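-- pv_equiv track=rewrite | github.com/brodri4/Week4 | Day5/algo.py | alt_semi
-- ===== SOURCE A (Python) =====
-- def factorial(n):
--     number = 1
--     for i in range(1, n+1):
--         number *= i
--     return number
--
-- def alt_semi(n):
--     alt = 0
--     semi = 1
--     for i in range(n, 0, -2):
--         fact = factorial(i)
--         alt += fact
--     for i in range(n-1, 0, -2):
--         fact = factorial(i)
--         alt -= fact
--     if n % 2 == 0:
--         for i in range(2, n+1):
--             if i % 2 == 0:
--                 semi *= i
--     else:
--         for i in range(2, n+1):
--             if i % 2 != 0:
--                 semi *= i
--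
--     return alt - semi
-- ===== SOURCE B (Python) =====
-- def alt_semi(n):
--     # One pass: build factorial incrementally, keep running alternating sum and semifactorial.
--     fact = 1
--     alt = 0
--     semi = 1
--     p = n % 2
--     for i in range(1, n + 1):
--         fact *= i
--         alt = fact - alt
--         if i % 2 == p:
--             semi *= i
--     return alt - semi
-- ===== Notes on version B (the rewrite author's own statement) =====
-- stated objective: faster
-- what changed: Replaced A's four separate loops (each calling an O(i) factorial helper) by a single forward pass that builds the factorial incrementally while maintaining the alternating sum and the semifactorial.
import Mathlib
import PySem

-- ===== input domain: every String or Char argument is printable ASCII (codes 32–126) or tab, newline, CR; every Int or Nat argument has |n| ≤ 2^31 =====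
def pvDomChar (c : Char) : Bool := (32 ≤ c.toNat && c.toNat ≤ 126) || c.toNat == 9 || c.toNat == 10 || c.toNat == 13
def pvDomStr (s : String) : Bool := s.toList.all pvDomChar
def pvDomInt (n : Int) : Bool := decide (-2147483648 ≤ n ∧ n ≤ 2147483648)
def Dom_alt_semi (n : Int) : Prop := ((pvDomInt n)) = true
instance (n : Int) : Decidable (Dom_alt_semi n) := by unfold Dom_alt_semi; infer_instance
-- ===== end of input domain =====

-- ===== PORT A =====
-- B replaces A's four loops (each step calling an O(i) factorial helper) by one pass with an incremental factorial (objective: faster).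
def factorial (n : Int) : Int :=
  (PySem.List.pyRange 1 (n+1) 1).foldl (fun number i => number * i) 1

def alt_semi (n : Int) : Int :=
  let alt : Int := 0
  let semi : Int := 1
  let alt := (PySem.List.pyRange n 0 (-2)).foldl (fun alt i => alt + factorial i) alt
  let alt := (PySem.List.pyRange (n-1) 0 (-2)).foldl (fun alt i => alt - factorial i) alt
  let semi :=
    if PySem.Int.mod n 2 == 0 then
      (PySem.List.pyRange 2 (n+1) 1).foldl
        (fun semi i => if PySem.Int.mod i 2 == 0 then semi * i else semi) semi
    else
      (PySem.List.pyRange 2 (n+1) 1).foldl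
        (fun semi i => if PySem.Int.mod i 2 != 0 then semi * i else semi) semi
  alt - semi

-- ===== PORT B =====
def alt_semi_alt (n : Int) : Int :=
  let p := PySem.Int.mod n 2
  let st := (PySem.List.pyRange 1 (n+1) 1).foldl
    (fun (st : Int × Int × Int) i =>
      let fact := st.1 * i
      let alt := fact - st.2.1
      let semi := if PySem.Int.mod i 2 == p then st.2.2 * i else st.2.2
      (fact, alt, semi)) (1, 0, 1)
  st.2.1 - st.2.2

-- ===== PRECONDITION & SPEC =====
def Spec_alt_semi (n : Int) (out : Int) : Prop := out = alt_semi_alt n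
instance (n : Int) (out : Int) : Decidable (Spec_alt_semi n out) := by unfold Spec_alt_semi; infer_instance

-- ===== CLAIM (what is proved, stated in full; the proofs are below) =====
def Claim_equal_alt_semi : Prop := ∀ (n : Int), Dom_alt_semi n → Spec_alt_semi n (alt_semi n)

-- ===== LEMMAS AND PROOFS =====

def factN : Nat → Int
  | 0 => 1
  | k+1 => factN k * ((k : Int) + 1)

theorem factorial_eq (k : Nat) : factorial (k : Int) = factN k := by
  induction k with
  | zero => simp [factorial, factN, PySem.List.pyRange_one_eq_nil]
  | succ k ih =>
    have h : PySem.List.pyRange 1 ((k : Int) + 1 + 1) 1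
        = PySem.List.pyRange 1 ((k : Int) + 1) 1 ++ [(k : Int) + 1] :=
      PySem.List.pyRange_one_succ_right (by omega)
    simp only [factorial] at ih ⊢
    push_cast
    rw [h, List.foldl_append, ih]
    simp [factN]

theorem foldl_add_shift (f : Int → Int) (l : List Int) : ∀ (c : Int),
    l.foldl (fun a i => a + f i) c = c + l.foldl (fun a i => a + f i) 0 := by
  induction l with
  | nil => simp
  | cons x xs ih =>
    intro c
    simp only [List.foldl_cons]
    rw [ih (c + f x), ih (0 + f x)]
    ring

theorem foldl_sub_shift (f : Int → Int) (l : List Int) : ∀ (c : Int),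
    l.foldl (fun a i => a - f i) c = c + l.foldl (fun a i => a - f i) 0 := by
  induction l with
  | nil => simp
  | cons x xs ih =>
    intro c
    simp only [List.foldl_cons]
    rw [ih (c - f x), ih (0 - f x)]
    ring

def altN : Nat → Int
  | 0 => 0
  | k+1 => factN (k+1) - altN k

theorem pyRange_down2_nil {n : Int} (h : n ≤ 0) : PySem.List.pyRange n 0 (-2) = [] := by
  simp [PySem.List.pyRange]; omega

theorem pyRange_down2_cons {n : Int} (h : 1 ≤ n) :
    PySem.List.pyRange n 0 (-2) = n :: PySem.List.pyRange (n-2) 0 (-2) := by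
  simp only [PySem.List.pyRange]
  norm_num
  rw [if_pos (by omega : (0:Int) < n)]
  have hc : ((n + 2 - 1) / 2).toNat = (if 2 < n then ((n - 1) / 2).toNat else 0) + 1 := by
    split_ifs with h2 <;> omega
  rw [hc, List.range_succ_eq_map, List.map_cons, List.map_map]
  congr 1
  · norm_num
  · apply List.map_congr_left
    intro k _
    simp [Function.comp]
    ring

theorem alt_loops_eq (k : Nat) :
    (PySem.List.pyRange ((k : Int) - 1) 0 (-2)).foldl (fun a i => a - factorial i)
      ((PySem.List.pyRange (k : Int) 0 (-2)).foldl (fun a i => a + factorial i) 0)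
    = altN k := by
  induction k using Nat.twoStepInduction with
  | zero => norm_num [pyRange_down2_nil, altN]
  | one =>
    norm_num [pyRange_down2_nil (by norm_num : (0:Int) ≤ 0)]
    rw [pyRange_down2_cons (by norm_num : (1:Int) ≤ 1),
        pyRange_down2_nil (by norm_num : (1:Int)-2 ≤ 0)]
    simp [altN, factN]
    decide
  | more k ih1 _ =>
    push_cast
    have e1 : (k : Int) + 2 - 1 = ((k+1 : Nat) : Int) := by push_cast; ring
    rw [pyRange_down2_cons (by omega : 1 ≤ (k : Int) + 2),
        e1, pyRange_down2_cons (by omega : 1 ≤ ((k+1 : Nat) : Int))]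
    simp only [List.foldl_cons]
    rw [foldl_sub_shift, foldl_add_shift]
    have e2 : (k : Int) + 2 - 2 = (k : Int) := by ring
    have e3 : ((k+1 : Nat) : Int) - 2 = (k : Int) - 1 := by push_cast; ring
    rw [e2, e3]
    rw [foldl_sub_shift] at ih1
    have hf : factorial ((k:Int)+2) = factN (k+2) := by
      have := factorial_eq (k+2); push_cast at this ⊢; linarith [this]
    have hf1 : factorial ((k:Int)+1) = factN (k+1) := by
      have := factorial_eq (k+1); push_cast at this ⊢; linarith [this]
    simp only [altN, factN] at *
    push_cast at *
    linarith

def semiN (p : Int) : Nat → Int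
  | 0 => 1
  | k+1 => if PySem.Int.mod ((k : Int) + 1) 2 == p then semiN p k * ((k : Int) + 1) else semiN p k

theorem pymod2 (a : Int) : PySem.Int.mod a 2 = a % 2 := by
  simp [PySem.Int.mod, Int.fmod_eq_emod]

theorem fmod_two (n : Int) : PySem.Int.mod n 2 = 0 ∨ PySem.Int.mod n 2 = 1 := by
  rw [pymod2]; omega

theorem semi_even_eq (k : Nat) :
    (PySem.List.pyRange 2 ((k : Int) + 1) 1).foldl
      (fun s i => if PySem.Int.mod i 2 == 0 then s * i else s) 1 = semiN 0 k := by
  induction k using Nat.twoStepInduction with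
  | zero => norm_num [PySem.List.pyRange_one_eq_nil, semiN]
  | one => norm_num [PySem.List.pyRange_one_eq_nil (by norm_num : (1:Int)+1 ≤ 2), semiN]
  | more k _ ih2 =>
    push_cast at ih2 ⊢
    rw [show (k : Int) + 1 + 1 = (k : Int) + 2 from by ring] at ih2
    rw [show (k : Int) + 2 + 1 = ((k : Int) + 2) + 1 by ring,
        PySem.List.pyRange_one_succ_right (by omega : (2:Int) ≤ (k : Int) + 2),
        List.foldl_append, ih2]
    simp only [semiN, List.foldl_cons, List.foldl_nil]
    push_cast
    rfl

theorem semi_odd_eq (k : Nat) :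
    (PySem.List.pyRange 2 ((k : Int) + 1) 1).foldl
      (fun s i => if PySem.Int.mod i 2 != 0 then s * i else s) 1 = semiN 1 k := by
  induction k using Nat.twoStepInduction with
  | zero => norm_num [PySem.List.pyRange_one_eq_nil, semiN]
  | one => norm_num [PySem.List.pyRange_one_eq_nil (by norm_num : (1:Int)+1 ≤ 2), semiN]
  | more k _ ih2 =>
    push_cast at ih2 ⊢
    rw [show (k : Int) + 1 + 1 = (k : Int) + 2 from by ring] at ih2
    rw [show (k : Int) + 2 + 1 = ((k : Int) + 2) + 1 by ring,
        PySem.List.pyRange_one_succ_right (by omega : (2:Int) ≤ (k : Int) + 2),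
        List.foldl_append, ih2]
    simp only [List.foldl_cons, List.foldl_nil]
    rw [show semiN 1 (k+2) = if PySem.Int.mod (((k+1 : Nat) : Int) + 1) 2 == 1 then semiN 1 (k+1) * (((k+1 : Nat) : Int) + 1) else semiN 1 (k+1) from rfl]
    simp only [pymod2, bne_iff_ne, beq_iff_eq, ne_eq]
    push_cast
    split_ifs with hc1 hc2 hc2
    all_goals try (exfalso; omega)
    all_goals ring

theorem b_fold_eq (p : Int) (k : Nat) :
    (PySem.List.pyRange 1 ((k : Int) + 1) 1).foldl
      (fun (st : Int × Int × Int) i =>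
        let fact := st.1 * i
        let alt := fact - st.2.1
        let semi := if PySem.Int.mod i 2 == p then st.2.2 * i else st.2.2
        (fact, alt, semi)) (1, 0, 1)
    = (factN k, altN k, semiN p k) := by
  induction k with
  | zero => norm_num [PySem.List.pyRange_one_eq_nil, factN, altN, semiN]
  | succ k ih =>
    push_cast
    rw [show (k : Int) + 1 + 1 = ((k : Int) + 1) + 1 by ring,
        PySem.List.pyRange_one_succ_right (by omega : (1:Int) ≤ (k : Int) + 1),
        List.foldl_append, ih]
    simp only [factN, altN, semiN, List.foldl_cons, List.foldl_nil]

-- ===== VERDICT (by name: the statement is the Claim_ definition above) =====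
theorem alt_semi_spec : Claim_equal_alt_semi := by
  intro n _
  unfold Spec_alt_semi
  simp only [alt_semi, alt_semi_alt]
  rcases (by omega : n ≤ 0 ∨ 0 < n) with hn | hn
  · rw [pyRange_down2_nil hn, pyRange_down2_nil (by omega : n - 1 ≤ 0),
        PySem.List.pyRange_one_eq_nil (by omega : n + 1 ≤ 2),
        PySem.List.pyRange_one_eq_nil (by omega : n + 1 ≤ 1)]
    simp only [List.foldl_nil]
    split_ifs <;> rfl
  · obtain ⟨k, rfl⟩ : ∃ k : Nat, n = (k : Int) := ⟨n.toNat, by omega⟩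
    rw [alt_loops_eq k, b_fold_eq (PySem.Int.mod (k : Int) 2) k]
    rcases fmod_two (k : Int) with h | h <;> rw [h]
    · simp only [show ((0:Int) == 0) = true from rfl, if_true]
      rw [semi_even_eq k]
    · simp only [show ((1:Int) == 0) = false from rfl, Bool.false_eq_true, if_false]
      rw [semi_odd_eq k]
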